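-- pv_equiv track=rewrite | github.com/Prashant161999/AI- | views.py | filter_prog_lang
-- ===== SOURCE A (Python) =====
-- lang_skills = ['java', 'python', 'c++', 'c#', 'html', 'jquery', 'mysql', 'php']
--
-- def filter_prog_lang(in_skills):
--     language = ""
--     for lang in lang_skills:
--         for skill in in_skills:
--             if str(lang) == str(skill):
--                 language = lang
--                 return language
--             else:
--                 language = ""
--     return language
-- ===== SOURCE B (Python) =====
-- lang_skills = ['java', 'python', 'c++', 'c#', 'html', 'jquery', 'mysql', 'php']
--
-- _lang_index = {lang: i for i, lang in enumerate(lang_skills)}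
--
-- def filter_prog_lang(in_skills):
--     best = None
--     for skill in in_skills:
--         i = _lang_index.get(str(skill))
--         if i is not None and (best is None or i < best):
--             best = i
--     return lang_skills[best] if best is not None else ""
-- ===== Notes on version B (the rewrite author's own statement) =====
-- stated objective: faster
-- what changed: Instead of scanning the language list outer and rescanning in_skills for each language, B builds a language-to-priority-index dict once and makes a single pass over in_skills tracking the minimum priority index, returning lang_skills[best] (or "" if none matched).
import Mathlib
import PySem

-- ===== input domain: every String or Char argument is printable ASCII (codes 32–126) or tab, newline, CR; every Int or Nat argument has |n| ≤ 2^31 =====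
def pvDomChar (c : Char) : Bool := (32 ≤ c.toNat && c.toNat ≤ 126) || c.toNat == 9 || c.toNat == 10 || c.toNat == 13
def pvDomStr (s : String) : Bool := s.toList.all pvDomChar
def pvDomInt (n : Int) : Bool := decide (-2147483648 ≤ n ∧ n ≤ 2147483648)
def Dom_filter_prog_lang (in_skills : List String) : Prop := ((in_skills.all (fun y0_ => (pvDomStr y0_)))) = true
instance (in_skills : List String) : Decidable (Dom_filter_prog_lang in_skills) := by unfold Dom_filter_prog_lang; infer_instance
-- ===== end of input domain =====

-- B replaces A's per-language rescans of in_skills by one pass tracking the minimum priority index via a precomputed language→index dict (faster by a constant factor).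


-- ===== PORT A =====
def pvLangSkills : List String := ["java", "python", "c++", "c#", "html", "jquery", "mysql", "php"]

-- inner 'for skill in in_skills' loop: returns some lang at the first match (str() on a str is identity)
def pvFilterInner (lang : String) : List String → Option String
  | [] => none
  | skill :: rest => if lang == skill then some lang else pvFilterInner lang rest

-- outer 'for lang in lang_skills' loop; 'language' is "" whenever the inner loop did not return
def pvFilterOuter (in_skills : List String) : List String → String
  | [] => ""
  | lang :: rest =>
    match pvFilterInner lang in_skills with
    | some r => r
    | none => pvFilterOuter in_skills rest

def filter_prog_lang (in_skills : List String) : String := pvFilterOuter in_skills pvLangSkills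

-- ===== PORT B =====
-- _lang_index = {lang: i for i, lang in enumerate(lang_skills)}
def pvLangIndex : PySem.Dict String Int :=
  (PySem.List.enumerate pvLangSkills 0).foldl (fun d p => d.insert p.2 p.1) PySem.Dict.empty

-- loop body: i = _lang_index.get(str(skill)); if i is not None and (best is None or i < best): best = i
def pvStep (best : Option Int) (skill : String) : Option Int :=
  match pvLangIndex.get? skill with
  | some i =>
    match best with
    | none => some i
    | some b => if i < b then some i else best
  | none => best

def filter_prog_lang_alt (in_skills : List String) : String :=
  match in_skills.foldl pvStep none with
  | some i => (PySem.List.pyGet? pvLangSkills i).getD ""  -- lang_skills[best]; best is always a valid index 0..7, the default is never used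
  | none => ""

-- ===== PRECONDITION & SPEC =====
def Spec_filter_prog_lang (in_skills : List String) (out : String) : Prop := out = filter_prog_lang_alt in_skills
instance (in_skills : List String) (out : String) : Decidable (Spec_filter_prog_lang in_skills out) := by unfold Spec_filter_prog_lang; infer_instance

-- ===== CLAIM (what is proved, stated in full; the proofs are below) =====
def Claim_equal_filter_prog_lang : Prop := ∀ (in_skills : List String), Dom_filter_prog_lang in_skills → Spec_filter_prog_lang in_skills (filter_prog_lang in_skills)

-- ===== LEMMAS AND PROOFS =====

-- index of s in a priority list whose first element has priority k (generic form of the dict lookup)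
def pvI : List String → Int → String → Option Int
  | [], _, _ => none
  | l :: ls, k, s => if l = s then some k else pvI ls (k + 1) s

-- first language of the priority list present in skills, with its priority (generic form of A's search)
def pvFp (skills : List String) : List String → Int → Option (Int × String)
  | [], _ => none
  | l :: ls, k => if l ∈ skills then some (k, l) else pvFp skills ls (k + 1)

-- option-valued minimum (none = no candidate)
def pvOmin : Option Int → Option Int → Option Int
  | none, b => b
  | some a, none => some a
  | some a, some b => some (min a b)

theorem pvI_ge (ls : List String) : ∀ (k : Int) (s : String) (i : Int), pvI ls k s = some i → k ≤ i := by
  induction ls with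
  | nil => intro k s i h; simp [pvI] at h
  | cons l ls ih =>
    intro k s i h
    simp only [pvI] at h
    split_ifs at h with hls
    · injection h with h'; omega
    · have := ih (k + 1) s i h; omega

theorem pvFp_ge (skills ls : List String) : ∀ (k i : Int) (l : String),
    pvFp skills ls k = some (i, l) → k ≤ i := by
  induction ls with
  | nil => intro k i l h; simp [pvFp] at h
  | cons l' ls ih =>
    intro k i l h
    simp only [pvFp] at h
    split_ifs at h with hm
    · simp only [Option.some.injEq, Prod.mk.injEq] at h
      obtain ⟨h1, h2⟩ := h
      omega
    · have := ih (k + 1) i l h; omega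

theorem pvOmin_some_of_le {k : Int} {o : Option Int} (h : ∀ i, o = some i → k ≤ i) :
    pvOmin (some k) o = some k := by
  cases o with
  | none => rfl
  | some i => simp [pvOmin, min_eq_left (h i rfl)]

theorem pvOmin_some_right {i k : Int} (h : k ≤ i) : pvOmin (some i) (some k) = some k := by
  simp [pvOmin, min_eq_right h]

theorem pvKey (s : String) (rest ls : List String) : ∀ k : Int,
    pvOmin (pvI ls k s) ((pvFp rest ls k).map (·.1)) = (pvFp (s :: rest) ls k).map (·.1) := by
  induction ls with
  | nil => intro k; rfl
  | cons l ls ih =>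
    intro k
    simp only [pvI, pvFp, List.mem_cons]
    by_cases hls : l = s
    · subst hls
      rw [if_pos (show l = l from rfl), if_pos (show l = l ∨ l ∈ rest from Or.inl rfl)]
      simp only [Option.map_some]
      apply pvOmin_some_of_le
      intro i hi
      revert hi
      split_ifs with hm
      · simp only [Option.map_some]; intro hi; injection hi with h'; omega
      · intro hi
        cases hFp : pvFp rest ls (k + 1) with
        | none => rw [hFp] at hi; simp at hi
        | some p =>
          rw [hFp] at hi
          obtain ⟨i', l'⟩ := p
          simp only [Option.map_some] at hi
          injection hi with h'
          have := pvFp_ge rest ls (k + 1) i' l' hFp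
          omega
    · by_cases hm : l ∈ rest
      · have hor : s = l ∨ l ∈ rest := Or.inr hm
        simp only [if_neg hls, if_pos hm, if_pos (Or.inr hm), Option.map_some]
        cases hI : pvI ls (k + 1) s with
        | none => rfl
        | some i => exact pvOmin_some_right (by have := pvI_ge ls (k + 1) s i hI; omega)
      · have hnot : ¬(l = s ∨ l ∈ rest) := by tauto
        simp only [if_neg hls, if_neg hm, if_neg hnot]
        exact ih (k + 1)

theorem pvLookup_eq (s : String) : pvLangIndex.get? s = pvI pvLangSkills 0 s := by
  have h : pvLangIndex = PySem.Dict.mk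
      [("java", 0), ("python", 1), ("c++", 2), ("c#", 3), ("html", 4), ("jquery", 5), ("mysql", 6), ("php", 7)] := by decide
  rw [h]
  have hnil : (PySem.Dict.mk ([] : List (String × Int))).get? s = none := rfl
  simp [pvLangSkills, PySem.Dict.get?_mk_cons, beq_iff_eq, pvI, hnil]

theorem pvStep_eq (best : Option Int) (s : String) :
    pvStep best s = pvOmin best (pvLangIndex.get? s) := by
  unfold pvStep
  cases pvLangIndex.get? s with
  | none => cases best <;> rfl
  | some i =>
    cases best with
    | none => rfl
    | some b =>
      simp only [pvOmin]
      rw [min_def]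
      split_ifs <;> first | rfl | omega

theorem pvFoldl_omin (skills : List String) : ∀ b : Option Int,
    skills.foldl pvStep b = pvOmin b (skills.foldl pvStep none) := by
  induction skills with
  | nil => intro b; cases b <;> rfl
  | cons s rest ih =>
    intro b
    rw [List.foldl_cons, List.foldl_cons, ih (pvStep b s), ih (pvStep none s),
        pvStep_eq b s, pvStep_eq none s]
    show pvOmin (pvOmin b _) _ = pvOmin b (pvOmin (pvOmin none _) _)
    rw [show ∀ x, pvOmin none x = x from fun x => rfl]
    cases b <;> cases hg : pvLangIndex.get? s <;> cases hr : rest.foldl pvStep none <;>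
      simp [pvOmin, min_assoc]

theorem pvM_eq (skills : List String) :
    skills.foldl pvStep none = (pvFp skills pvLangSkills 0).map (·.1) := by
  induction skills with
  | nil => rfl
  | cons s rest ih =>
    rw [List.foldl_cons, pvFoldl_omin rest, ih, pvStep_eq]
    rw [show pvOmin none (pvLangIndex.get? s) = pvLangIndex.get? s from rfl]
    rw [pvLookup_eq]
    exact pvKey s rest pvLangSkills 0

theorem pvInner_eq (lang : String) (skills : List String) :
    pvFilterInner lang skills = if lang ∈ skills then some lang else none := by
  induction skills with
  | nil => rfl
  | cons skill rest ih =>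
    simp only [pvFilterInner, ih, List.mem_cons]
    by_cases h : lang = skill <;> simp [h]

theorem pvOuter_eq (skills : List String) (ls : List String) : ∀ k : Int,
    pvFilterOuter skills ls = (match pvFp skills ls k with | some p => p.2 | none => "") := by
  induction ls with
  | nil => intro k; rfl
  | cons l ls ih =>
    intro k
    simp only [pvFilterOuter, pvInner_eq, pvFp]
    by_cases h : l ∈ skills
    · simp [h]
    · simp [h, ih (k + 1)]

theorem pvMain (skills : List String) : filter_prog_lang skills = filter_prog_lang_alt skills := by
  unfold filter_prog_lang filter_prog_lang_alt
  rw [pvM_eq, pvOuter_eq skills pvLangSkills 0]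
  cases hF : pvFp skills pvLangSkills 0 with
  | none => rfl
  | some p =>
    obtain ⟨i, l⟩ := p
    have g0 : PySem.List.pyGet? pvLangSkills 0 = some "java" := by decide
    have g1 : PySem.List.pyGet? pvLangSkills 1 = some "python" := by decide
    have g2 : PySem.List.pyGet? pvLangSkills 2 = some "c++" := by decide
    have g3 : PySem.List.pyGet? pvLangSkills 3 = some "c#" := by decide
    have g4 : PySem.List.pyGet? pvLangSkills 4 = some "html" := by decide
    have g5 : PySem.List.pyGet? pvLangSkills 5 = some "jquery" := by decide
    have g6 : PySem.List.pyGet? pvLangSkills 6 = some "mysql" := by decide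
    have g7 : PySem.List.pyGet? pvLangSkills 7 = some "php" := by decide
    have hget : PySem.List.pyGet? pvLangSkills i = some l := by
      simp only [pvLangSkills, pvFp] at hF
      split_ifs at hF <;> simp_all
    simp [hget]

-- ===== VERDICT (by name: the statement is the Claim_ definition above) =====
theorem filter_prog_lang_spec : Claim_equal_filter_prog_lang := by
  intro in_skills _
  unfold Spec_filter_prog_lang
  exact pvMain in_skills
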